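-- pv_equiv track=rewrite | github.com/seukgcode/MEL-GHMFC | code/nel_model/nel_process.py | cross_split
-- ===== SOURCE A (Python) =====
-- def cross_split(ndata, folds):
--     N = len(ndata)
--     nfold = N // folds
--
--     data_folds = [[] for _ in range(folds)]
--     for f in range(folds):
--         if f != folds - 1:
--             fdata = ndata[f * nfold: (f+1)*nfold]
--         else:
--             fdata = ndata[f * nfold:]
--
--         data_folds[f] = fdata
--     return data_folds
-- ===== SOURCE B (Python) =====
-- def cross_split(ndata, folds):
--     nfold = len(ndata) // folds
--     out = [[] for _ in range(folds)]
--     if out: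
--         last = len(out) - 1
--         for i, e in enumerate(ndata):
--             j = i // nfold if nfold > 0 else last
--             out[min(j, last)].append(e)
--     return out
-- ===== Notes on version B (the rewrite author's own statement) =====
-- stated objective: alternative
-- what changed: B makes a single pass over the elements, dispatching each element i into bucket min(i//nfold, folds-1) (last bucket when nfold==0), instead of A's per-fold contiguous slicing with a branch for the last fold.
import Mathlib
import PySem

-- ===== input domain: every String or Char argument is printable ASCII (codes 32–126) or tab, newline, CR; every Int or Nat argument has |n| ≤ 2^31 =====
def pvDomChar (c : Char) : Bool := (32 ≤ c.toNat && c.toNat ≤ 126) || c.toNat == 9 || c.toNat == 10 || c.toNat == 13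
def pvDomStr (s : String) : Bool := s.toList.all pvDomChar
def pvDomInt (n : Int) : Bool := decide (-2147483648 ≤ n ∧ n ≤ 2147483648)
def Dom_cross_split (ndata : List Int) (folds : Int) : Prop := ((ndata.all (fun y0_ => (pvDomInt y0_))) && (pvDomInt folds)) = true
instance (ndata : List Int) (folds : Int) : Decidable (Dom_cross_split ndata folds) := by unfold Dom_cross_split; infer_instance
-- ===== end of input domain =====

-- B distributes each element in one pass into bucket min(i // nfold, folds-1) (last bucket
-- when nfold == 0) instead of A's per-fold contiguous slicing; objective: alternative.

-- ===== PORT A =====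
def cross_split (ndata : List Int) (folds : Int) : List (List Int) :=
  let N : Int := ndata.length
  let nfold : Int := PySem.Int.floordiv N folds
  let data_folds : List (List Int) := (PySem.List.pyRange 0 folds 1).map (fun _ => [])
  (PySem.List.pyRange 0 folds 1).foldl
    (fun df f =>
      let fdata :=
        if f ≠ folds - 1 then
          PySem.List.slice ndata (some (f * nfold)) (some ((f + 1) * nfold))
        else
          PySem.List.slice ndata (some (f * nfold)) none
      df.set f.toNat fdata)
    data_folds

-- ===== PORT B =====
def cross_split_alt (ndata : List Int) (folds : Int) : List (List Int) :=
  let nfold : Int := PySem.Int.floordiv ndata.length folds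
  let out : List (List Int) := (PySem.List.pyRange 0 folds 1).map (fun _ => [])
  if out.isEmpty then out
  else
    let last : Int := out.length - 1
    (PySem.List.enumerate ndata 0).foldl
      (fun out p =>
        let j : Int := if nfold > 0 then PySem.Int.floordiv p.1 nfold else last
        out.modify (min j last).toNat (fun l => l ++ [p.2]))
      out

-- ===== PRECONDITION & SPEC =====
-- Pre_ excludes exactly folds = 0, where Python A raises ZeroDivisionError.
def Pre_cross_split (ndata : List Int) (folds : Int) : Prop := folds ≠ 0
instance (ndata : List Int) (folds : Int) : Decidable (Pre_cross_split ndata folds) := by unfold Pre_cross_split; infer_instance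
def pvWitness_cross_split : List Int × Int := ([1, 2, 3, 4, 5], 2)

def Spec_cross_split (ndata : List Int) (folds : Int) (out : List (List Int)) : Prop := out = cross_split_alt ndata folds
instance (ndata : List Int) (folds : Int) (out : List (List Int)) : Decidable (Spec_cross_split ndata folds out) := by unfold Spec_cross_split; infer_instance

-- ===== CLAIM (what is proved, stated in full; the proofs are below) =====
def Claim_equal_cross_split : Prop := ∀ (ndata : List Int) (folds : Int), Dom_cross_split ndata folds → Pre_cross_split ndata folds → Spec_cross_split ndata folds (cross_split ndata folds)

-- ===== LEMMAS AND PROOFS =====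

theorem pv_set_zero_drop {α : Type} (init : List α) (m : Nat) (hm : m < init.length) (v : α) :
    (List.drop m init).set 0 v = v :: List.drop (m + 1) init := by
  apply List.ext_getElem
  · simp; omega
  · intro k h1 h2
    cases k with
    | zero => simp
    | succ k =>
      simp only [List.getElem_set, List.getElem_drop, List.getElem_cons_succ]
      rw [if_neg (by omega)]
      congr 1
      omega

theorem pv_setfold {α : Type} (g : Nat → α) (m : Nat) (init : List α) (hm : m ≤ init.length) :
    (List.range m).foldl (fun df f => df.set f (g f)) init = (List.range m).map g ++ init.drop m := by
  induction m with
  | zero => simp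
  | succ m ih =>
    rw [List.range_succ, List.foldl_append, ih (by omega)]
    simp only [List.foldl_cons, List.foldl_nil, List.set_append, List.length_map,
      List.length_range, lt_irrefl, Nat.sub_self, List.map_append]
    rw [pv_set_zero_drop init m (by omega)]
    simp

theorem pv_mapIdx_modify {α : Type} (init : List α) (i : Nat) (g : α → α) (F : Nat → α → α) :
    (init.modify i g).mapIdx F = init.mapIdx (fun j l => F j (if j = i then g l else l)) := by
  apply List.ext_getElem
  · simp
  · intro k h1 h2
    simp only [List.getElem_mapIdx, List.getElem_modify]
    by_cases h : k = i <;> simp [h, Ne.symm]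


theorem pv_modfold (bkt : Int → Nat) (items : List (Int × Int)) :
    ∀ (init : List (List Int)),
      (∀ p ∈ items, bkt p.1 < init.length) →
      items.foldl (fun out p => out.modify (bkt p.1) (fun l => l ++ [p.2])) init
        = init.mapIdx (fun j l => l ++ (items.filter (fun p => bkt p.1 == j)).map Prod.snd) := by
  induction items with
  | nil => intro init _; apply List.ext_getElem <;> simp
  | cons p items ih =>
    intro init h
    rw [List.foldl_cons, ih _ (fun q hq => by
      simpa using h q (List.mem_cons_of_mem _ hq)), pv_mapIdx_modify]
    apply List.ext_getElem
    · simp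
    · intro k h1 h2
      simp only [List.getElem_mapIdx, List.filter_cons]
      by_cases hk : bkt p.1 = k
      · simp [hk]
      · simp [hk, Ne.symm hk]

theorem pv_seg {α : Type} (xs : List α) : ∀ (k a b : Nat),
    ((PySem.List.enumerate xs (k : Int)).filter
        (fun p => decide ((a : Int) ≤ p.1 ∧ p.1 < (b : Int)))).map Prod.snd
      = (xs.drop (a - k)).take (b - max a k) := by
  induction xs with
  | nil => intro k a b; simp [PySem.List.enumerate_nil]
  | cons x xs ih =>
    intro k a b
    rw [PySem.List.enumerate_cons, show (k : Int) + 1 = ((k + 1 : Nat) : Int) by push_cast; ring]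
    by_cases h : a ≤ k ∧ k < b
    · rw [List.filter_cons_of_pos
        (by simp only [decide_eq_true_eq]; exact ⟨by exact_mod_cast h.1, by exact_mod_cast h.2⟩)]
      rw [List.map_cons, ih (k + 1) a b]
      have e1 : a - k = 0 := by omega
      have e3 : a - (k + 1) = 0 := by omega
      have e4 : max a (k + 1) = k + 1 := by omega
      have e5 : b - max a k = (b - (k + 1)) + 1 := by omega
      rw [e1, e3, e4, e5]
      simp
    · rw [List.filter_cons_of_neg
        (by simp only [decide_eq_true_eq]; omega)]
      rw [ih (k + 1) a b]
      by_cases hk : k < a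
      · have e1 : a - k = (a - (k + 1)) + 1 := by omega
        have e2 : max a k = max a (k + 1) := by omega
        rw [e1, e2]
        simp
      · have e1 : b - max a k = 0 := by omega
        have e2 : b - max a (k + 1) = 0 := by omega
        rw [e1, e2]
        simp

theorem pv_mapIdx_map_const {α β : Type} (n : Nat) (c : α) (F : Nat → α → β) :
    ((List.range n).map (fun _ => c)).mapIdx F = (List.range n).map (fun j => F j c) := by
  apply List.ext_getElem <;> simp

theorem pv_setfold_int {α : Type} (g : Int → α) (n : Nat) (init : List α) (h : n ≤ init.length) :
    ((List.range n).map (fun (k : Nat) => (k : Int))).foldl (fun df f => df.set f.toNat (g f)) init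
      = (List.range n).map (fun (k : Nat) => g (k : Int)) ++ init.drop n := by
  rw [List.foldl_map]
  have h2 := pv_setfold (fun k => g (k : Int)) n init h
  simpa using h2

theorem pv_main (ndata : List Int) (folds : Int) (h0 : folds ≠ 0) :
    cross_split ndata folds = cross_split_alt ndata folds := by
  by_cases hneg : folds < 0
  · simp [cross_split, cross_split_alt, PySem.List.pyRange_one_eq_nil (le_of_lt hneg)]
  · have hpos : 0 < folds := by omega
    obtain ⟨n, rfl⟩ : ∃ n : Nat, folds = (n : Int) := ⟨folds.toNat, (Int.toNat_of_nonneg hpos.le).symm⟩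
    have hn : 0 < n := by exact_mod_cast hpos
    have hpr := PySem.List.pyRange_zero_natCast n
    -- A side
    have hA : cross_split ndata (n : Int) = (List.range n).map (fun (k : Nat) =>
        if (k : Int) ≠ (n : Int) - 1 then
          PySem.List.slice ndata (some ((k : Int) * ((ndata.length / n : Nat) : Int)))
            (some (((k : Int) + 1) * ((ndata.length / n : Nat) : Int)))
        else
          PySem.List.slice ndata (some ((k : Int) * ((ndata.length / n : Nat) : Int))) none) := by
      show (PySem.List.pyRange 0 (n : Int) 1).foldl _ _ = _
      rw [hpr, pv_setfold_int _ n _ (by simp)]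
      simp [PySem.Int.floordiv_natCast]
    -- B side
    have hB : cross_split_alt ndata (n : Int) = (List.range n).map (fun j =>
        ((PySem.List.enumerate ndata 0).filter (fun p =>
          (min (if ((ndata.length / n : Nat) : Int) > 0 then
                  PySem.Int.floordiv p.1 ((ndata.length / n : Nat) : Int)
                else (n : Int) - 1) ((n : Int) - 1)).toNat == j)).map Prod.snd) := by
      unfold cross_split_alt
      rw [hpr]
      have hne : ((List.range n).map (fun x => ([] : List Int))).isEmpty = false := by
        cases n with
        | zero => omega
        | succ m => simp [List.range_succ]
      simp only [List.map_map, Function.comp_def, PySem.Int.floordiv_natCast,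
        List.length_map, List.length_range, hne, Bool.false_eq_true, if_false]
      refine (pv_modfold (fun i => (min (if ((ndata.length / n : Nat) : Int) > 0 then
          PySem.Int.floordiv i ((ndata.length / n : Nat) : Int) else (n : Int) - 1)
          ((n : Int) - 1)).toNat) (PySem.List.enumerate ndata 0)
        ((List.range n).map (fun _ => ([] : List Int))) ?_).trans ?_
      · intro p hp
        simp only [List.length_map, List.length_range]
        have hmr := min_le_right
          (if ((ndata.length / n : Nat) : Int) > 0 then
              PySem.Int.floordiv p.1 ((ndata.length / n : Nat) : Int)
            else (n : Int) - 1) ((n : Int) - 1)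
        omega
      · rw [pv_mapIdx_map_const]
        simp
    -- pointwise equality of the two per-fold descriptions
    rw [hA, hB]
    apply List.map_congr_left
    intro j hj
    rw [List.mem_range] at hj
    by_cases hnf : ndata.length / n = 0
    · by_cases hj1 : j = n - 1
      · subst hj1
        rw [if_neg (by omega)]
        have hfil : (PySem.List.enumerate ndata 0).filter (fun p =>
              (min (if ((ndata.length / n : Nat) : Int) > 0 then
                PySem.Int.floordiv p.1 ((ndata.length / n : Nat) : Int)
              else (n : Int) - 1) ((n : Int) - 1)).toNat == (n - 1))
            = PySem.List.enumerate ndata 0 :=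
          List.filter_eq_self.mpr
            (fun p hp => by rw [hnf]; simp only [Nat.cast_zero]; norm_num)
        rw [hfil, hnf]
        simp [PySem.List.map_snd_enumerate]
      · rw [if_pos (by omega)]
        have hfil : (PySem.List.enumerate ndata 0).filter (fun p =>
              (min (if ((ndata.length / n : Nat) : Int) > 0 then
                PySem.Int.floordiv p.1 ((ndata.length / n : Nat) : Int)
              else (n : Int) - 1) ((n : Int) - 1)).toNat == j)
            = [] :=
          List.filter_eq_nil_iff.mpr
            (fun p hp => by rw [hnf]; simp only [Nat.cast_zero]; norm_num; omega)
        rw [hfil, hnf]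
        simp [PySem.List.slice_toNat]
    · have hnfp : 0 < ndata.length / n := Nat.pos_of_ne_zero hnf
      set nf := ndata.length / n with hnfdef
      have hcast : ((nf : Nat) : Int) > 0 := by exact_mod_cast hnfp
      by_cases hj1 : j = n - 1
      · subst hj1
        rw [if_neg (by omega)]
        have hfc : (PySem.List.enumerate ndata 0).filter (fun p =>
              (min (if ((nf : Nat) : Int) > 0 then PySem.Int.floordiv p.1 ((nf : Nat) : Int)
                else (n : Int) - 1) ((n : Int) - 1)).toNat == (n - 1))
            = (PySem.List.enumerate ndata 0).filter (fun p =>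
              decide ((((n - 1) * nf : Nat) : Int) ≤ p.1 ∧ p.1 < ((ndata.length : Nat) : Int))) := by
          apply List.filter_congr
          intro p hp
          obtain ⟨k, hk, rfl⟩ := (PySem.List.mem_enumerate_iff _ _ _).mp hp
          simp only [zero_add]
          rw [if_pos hcast, PySem.Int.floordiv_natCast]
          rw [Bool.eq_iff_iff]
          simp only [beq_iff_eq, decide_eq_true_eq]
          rw [show ((n : Int) - 1) = ((n - 1 : Nat) : Int) by omega, ← Nat.cast_min,
            Int.toNat_natCast]
          have hle : n - 1 ≤ k / nf ↔ (n - 1) * nf ≤ k := Nat.le_div_iff_mul_le hnfp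
          set d := k / nf with hd
          constructor
          · intro h
            refine ⟨?_, by exact_mod_cast hk⟩
            have h1 : n - 1 ≤ d := by omega
            exact_mod_cast hle.mp h1
          · rintro ⟨h1, _⟩
            have h1' : (n - 1) * nf ≤ k := by exact_mod_cast h1
            have := hle.mpr h1'
            omega
        rw [hfc]
        have hseg := pv_seg ndata 0 ((n - 1) * nf) ndata.length
        simp only [Nat.cast_zero, Nat.sub_zero, Nat.max_zero] at hseg
        rw [hseg, List.take_of_length_le (by simp)]
        rw [show ((n - 1 : Nat) : Int) * ((nf : Nat) : Int) = (((n - 1) * nf : Nat) : Int) by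
              push_cast; ring,
            PySem.List.slice_from_natCast]
      · rw [if_pos (by omega)]
        have hfc : (PySem.List.enumerate ndata 0).filter (fun p =>
              (min (if ((nf : Nat) : Int) > 0 then PySem.Int.floordiv p.1 ((nf : Nat) : Int)
                else (n : Int) - 1) ((n : Int) - 1)).toNat == j)
            = (PySem.List.enumerate ndata 0).filter (fun p =>
              decide (((j * nf : Nat) : Int) ≤ p.1 ∧ p.1 < (((j + 1) * nf : Nat) : Int))) := by
          apply List.filter_congr
          intro p hp
          obtain ⟨k, hk, rfl⟩ := (PySem.List.mem_enumerate_iff _ _ _).mp hp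
          simp only [zero_add]
          rw [if_pos hcast, PySem.Int.floordiv_natCast]
          rw [Bool.eq_iff_iff]
          simp only [beq_iff_eq, decide_eq_true_eq]
          rw [show ((n : Int) - 1) = ((n - 1 : Nat) : Int) by omega, ← Nat.cast_min,
            Int.toNat_natCast]
          have hd1 : (k / nf) * nf ≤ k := Nat.div_mul_le_self k nf
          have hd2 : k < (k / nf + 1) * nf := by
            have h1 := Nat.div_add_mod k nf
            have h2 := Nat.mod_lt k hnfp
            have h3 : (k / nf + 1) * nf = nf * (k / nf) + nf := by ring
            omega
          constructor
          · intro h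
            have hdj : k / nf = j := by
              set d := k / nf with hd
              omega
            rw [hdj] at hd1 hd2
            exact ⟨by exact_mod_cast hd1, by exact_mod_cast hd2⟩
          · rintro ⟨h1, h2⟩
            have h1' : j * nf ≤ k := by exact_mod_cast h1
            have h2' : k < (j + 1) * nf := by exact_mod_cast h2
            have hdj := Nat.div_eq_of_lt_le h1' h2'
            set d := k / nf with hd
            omega
        rw [hfc]
        have hseg := pv_seg ndata 0 (j * nf) ((j + 1) * nf)
        simp only [Nat.cast_zero, Nat.sub_zero, Nat.max_zero] at hseg
        rw [hseg]
        rw [show ((j : Nat) : Int) * ((nf : Nat) : Int) = ((j * nf : Nat) : Int) by push_cast; ring,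
            show ((j : Nat) : Int) + 1 = (((j + 1 : Nat)) : Int) by push_cast; ring,
            show (((j + 1 : Nat)) : Int) * ((nf : Nat) : Int) = (((j + 1) * nf : Nat) : Int) by
              push_cast; ring,
            PySem.List.slice_natCast]

-- ===== VERDICT (by name: the statement is the Claim_ definition above) =====
theorem cross_split_spec : Claim_equal_cross_split := by
  intro ndata folds _ hpre
  unfold Spec_cross_split
  exact pv_main ndata folds hpre
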